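-- pv_equiv track=rewrite | github.com/Sinha-Ujjawal/binary-classifier-django | src/binary_classifier_app/views/classifier_model_views/train.py | make_Xy
-- ===== SOURCE A (Python) =====
-- from typing import List, Tuple
--
-- def make_Xy(
--     type_0: List[List[int]], type_1: List[List[int]]
-- ) -> Tuple[List[List[int]], List[int]]:
--     X = []
--     y = []
--     for label, coords in enumerate([type_0, type_1]):
--         for coord in coords:
--             X.append(coord)
--             y.append(label)
--     return X, y
-- ===== SOURCE B (Python) =====
-- from typing import List, Tuple
--
-- def make_Xy(
--     type_0: List[List[int]], type_1: List[List[int]]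
-- ) -> Tuple[List[List[int]], List[int]]:
--     # Index-arithmetic construction: one pass over the combined index range;
--     # each position i picks its row and label by comparing i with the class boundary.
--     n0 = len(type_0)
--     n = n0 + len(type_1)
--     X = [type_0[i] if i < n0 else type_1[i - n0] for i in range(n)]
--     y = [0 if i < n0 else 1 for i in range(n)]
--     return X, y
-- ===== Notes on version B (the rewrite author's own statement) =====
-- stated objective: alternative
-- what changed: Replaces A's enumerate-over-classes append loops with an index-arithmetic construction: a single pass over the combined index range range(len(type_0)+len(type_1)), where each position selects its row and its 0/1 label by comparing the index with the class boundary, never iterating over either input list directly.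
import Mathlib
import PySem

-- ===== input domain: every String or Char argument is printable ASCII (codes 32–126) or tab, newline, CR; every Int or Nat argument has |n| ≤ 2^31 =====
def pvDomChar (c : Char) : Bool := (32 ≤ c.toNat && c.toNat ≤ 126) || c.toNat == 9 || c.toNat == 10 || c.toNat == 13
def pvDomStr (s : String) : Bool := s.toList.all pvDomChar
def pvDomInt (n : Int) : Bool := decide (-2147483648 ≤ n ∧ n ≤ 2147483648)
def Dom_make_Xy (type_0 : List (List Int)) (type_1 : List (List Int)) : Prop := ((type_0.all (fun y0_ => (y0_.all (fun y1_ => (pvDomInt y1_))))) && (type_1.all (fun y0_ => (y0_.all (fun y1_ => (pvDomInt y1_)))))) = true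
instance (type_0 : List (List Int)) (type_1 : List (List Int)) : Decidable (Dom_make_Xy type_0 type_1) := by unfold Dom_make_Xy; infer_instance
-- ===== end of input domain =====

-- B replaces A's enumerate-over-classes append loops by an index-arithmetic pass over the
-- combined index range, selecting each row and label by comparing the index with the class
-- boundary; objective: alternative (same cost, different construction).

-- ===== PORT A =====
-- literal port: fold over enumerate([type_0, type_1]); inner fold appends coord to X, label to y
def make_Xy (type_0 : List (List Int)) (type_1 : List (List Int)) : List (List Int) × List Int :=
  (PySem.List.enumerate [type_0, type_1]).foldl
    (fun (acc : List (List Int) × List Int) lc =>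
      lc.2.foldl (fun acc coord => (acc.1 ++ [coord], acc.2 ++ [lc.1])) acc)
    ([], [])

-- ===== PORT B =====
-- Source B: n0 = len(type_0); n = n0 + len(type_1);
-- X = [type_0[i] if i < n0 else type_1[i-n0] for i in range(n)]; y = [0 if i < n0 else 1 ...]
-- indices of range(n) are nonnegative and always in range, so Nat range + getD is exact here
def make_Xy_alt (type_0 : List (List Int)) (type_1 : List (List Int)) : List (List Int) × List Int :=
  let n0 := type_0.length
  let n := n0 + type_1.length
  ((List.range n).map (fun i => if i < n0 then type_0.getD i [] else type_1.getD (i - n0) []),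
   (List.range n).map (fun i => if i < n0 then (0 : Int) else 1))

-- ===== PRECONDITION & SPEC =====
def Spec_make_Xy (type_0 : List (List Int)) (type_1 : List (List Int)) (out : List (List Int) × List Int) : Prop := out = make_Xy_alt type_0 type_1
instance (type_0 : List (List Int)) (type_1 : List (List Int)) (out : List (List Int) × List Int) : Decidable (Spec_make_Xy type_0 type_1 out) := by unfold Spec_make_Xy; infer_instance

-- ===== CLAIM (what is proved, stated in full; the proofs are below) =====
def Claim_equal_make_Xy : Prop := ∀ (type_0 : List (List Int)) (type_1 : List (List Int)), Dom_make_Xy type_0 type_1 → Spec_make_Xy type_0 type_1 (make_Xy type_0 type_1)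

-- ===== LEMMAS AND PROOFS =====

-- A's inner append loop over one class, from an arbitrary accumulator
lemma make_Xy_inner (label : Int) (coords : List (List Int)) (X : List (List Int)) (y : List Int) :
    coords.foldl (fun (acc : List (List Int) × List Int) coord => (acc.1 ++ [coord], acc.2 ++ [label])) (X, y)
      = (X ++ coords, y ++ List.replicate coords.length label) := by
  induction coords generalizing X y with
  | nil => simp
  | cons c cs ih => simp [List.foldl_cons, ih, List.replicate_succ]

lemma map_range_getD {α : Type} (l : List α) (d : α) :
    (List.range l.length).map (fun i => l.getD i d) = l := by
  apply List.ext_getElem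
  · simp
  · intro i h1 h2
    simp [List.getD, List.getElem?_eq_getElem h2]

-- verdict proof
theorem make_Xy_spec : Claim_equal_make_Xy := by
  intro type_0 type_1 _
  show make_Xy type_0 type_1 = make_Xy_alt type_0 type_1
  have hA : make_Xy type_0 type_1
      = (type_0 ++ type_1,
         List.replicate type_0.length 0 ++ List.replicate type_1.length 1) := by
    simp [make_Xy, PySem.List.enumerate, make_Xy_inner]
  have hsplit : List.range (type_0.length + type_1.length)
      = List.range type_0.length ++ (List.range type_1.length).map (type_0.length + ·) :=
    List.range_add ..
  have hB : make_Xy_alt type_0 type_1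
      = (type_0 ++ type_1,
         List.replicate type_0.length 0 ++ List.replicate type_1.length 1) := by
    simp only [make_Xy_alt, hsplit, List.map_append, List.map_map]
    congr 1
    · congr 1
      · rw [List.map_congr_left (g := fun i => type_0.getD i []), map_range_getD]
        intro i hi
        simp [List.mem_range.mp hi]
      · rw [List.map_congr_left (g := fun i => type_1.getD i []), map_range_getD]
        intro i hi
        simp [Function.comp]
    · congr 1
      · rw [List.map_congr_left (g := fun _ => (0 : Int))]
        · simp [List.map_const']
        · intro i hi; simp [List.mem_range.mp hi]
      · rw [List.map_congr_left (g := fun _ => (1 : Int))]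
        · simp [List.map_const']
        · intro i hi; simp [Function.comp]
  rw [hA, hB]

-- ===== VERDICT (by name: the statement is the Claim_ definition above) =====
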